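-- pv_equiv track=rewrite | github.com/erdosnumber/Karnaugh-Maps | Assignment-3/Code.py | checks2ins1
-- ===== SOURCE A (Python) =====
-- def checks2ins1(s1,s2):
--     i1=int(0)
--     i2=int(0)
--     sz1=int(len(s1))
--     sz2=int(len(s2))
--     pos=True
--     while(i1<sz1 and i2<sz2):
--         if(s1[i1]==s2[i2]):
--             if(i2<sz2-1 and s2[i2+1]=="'"):
--                 if(i1<sz1-1 and s1[i1+1]!="'"):
--                     pos=False
--                     break
--                 elif(i1==sz1-1):
--                     pos=False
--                     break
--                 else:
--                     i1+=2
--                     i2+=2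
--             else:
--                 if(i1<sz1-1 and s1[i1+1]=="'"):
--                     pos=False
--                     break
--                 else:
--                     i1+=1
--                     i2+=1
--         else:
--             i1+=1
--         if(i2==sz2):
--             break
--
--     if(i1>=sz1 and i2<sz2):
--         pos=False
--     return pos
-- ===== SOURCE B (Python) =====
-- def checks2ins1(s1, s2):
--     # B: index-and-jump instead of char-by-char two-pointer scanning.
--     # Build once a map from each character of s1 to its ascending list of
--     # positions; parse s2 into (char, primed) tokens; then for each token,
--     # binary-search the position list for the first occurrence at or after
--     # the current cursor and check the prime flag there.
--     pos = {}
--     for k, ch in enumerate(s1):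
--         pos.setdefault(ch, []).append(k)
--     toks = []
--     j = 0
--     while j < len(s2):
--         primed = j + 1 < len(s2) and s2[j + 1] == "'"
--         toks.append((s2[j], primed))
--         j += 2 if primed else 1
--     i = 0
--     for c, p in toks:
--         P = pos.get(c, [])
--         lo, hi = 0, len(P)        # bisect_left(P, i), hand-rolled (no imports)
--         while lo < hi:
--             mid = (lo + hi) // 2
--             if P[mid] < i:
--                 lo = mid + 1
--             else:
--                 hi = mid
--         if lo == len(P):
--             return False
--         k = P[lo]
--         if (k + 1 < len(s1) and s1[k + 1] == "'") != p:
--             return False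
--         i = k + (2 if p else 1)
--     return True
-- ===== Notes on version B (the rewrite author's own statement) =====
-- stated objective: alternative
-- what changed: B replaces A's interleaved char-by-char two-pointer scan with an index-and-jump algorithm: it builds a char-to-ascending-positions map of s1 once, parses s2 into (char, primed) tokens, and for each token binary-searches the position list for the first occurrence at or after the cursor before checking the prime flag there.
import Mathlib
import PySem

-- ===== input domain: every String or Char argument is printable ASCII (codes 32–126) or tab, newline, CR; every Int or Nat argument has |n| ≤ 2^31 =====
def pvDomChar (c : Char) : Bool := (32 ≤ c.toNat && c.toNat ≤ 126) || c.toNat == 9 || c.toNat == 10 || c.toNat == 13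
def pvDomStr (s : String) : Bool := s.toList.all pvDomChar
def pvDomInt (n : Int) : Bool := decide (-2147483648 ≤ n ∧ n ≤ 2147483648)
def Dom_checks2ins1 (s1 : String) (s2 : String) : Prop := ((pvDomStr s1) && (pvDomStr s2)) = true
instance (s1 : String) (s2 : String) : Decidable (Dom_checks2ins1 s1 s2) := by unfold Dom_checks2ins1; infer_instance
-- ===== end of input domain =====

-- B builds a char→positions index of s1 once, tokenises s2, and jumps through the index by
-- binary search instead of A's char-by-char two-pointer scan; objective: alternative algorithm.

-- ===== PORT A =====
-- A's while loop: indices i1 into s1 and i2 into s2, the `pos` flag becoming the value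
-- returned at each break, and the final `if i1>=sz1 and i2<sz2: pos=False`. A's trailing
-- `if i2==sz2: break` only re-checks the loop condition, so it adds nothing here.
-- Each iteration increases i1, which gives termination.
def checks2ins1Loop (l1 l2 : List Char) (i1 i2 : Nat) : Bool :=
  if _h : i1 < l1.length ∧ i2 < l2.length then
    if l1.getD i1 ' ' == l2.getD i2 ' ' then
      if i2 < l2.length - 1 && (l2.getD (i2+1) ' ' == '\'') then
        if i1 < l1.length - 1 && !(l1.getD (i1+1) ' ' == '\'') then false
        else if i1 == l1.length - 1 then false
        else checks2ins1Loop l1 l2 (i1+2) (i2+2)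
      else
        if i1 < l1.length - 1 && (l1.getD (i1+1) ' ' == '\'') then false
        else checks2ins1Loop l1 l2 (i1+1) (i2+1)
    else checks2ins1Loop l1 l2 (i1+1) i2
  else
    !(decide (i1 ≥ l1.length) && decide (i2 < l2.length))
termination_by l1.length - i1
decreasing_by all_goals omega

def checks2ins1 (s1 : String) (s2 : String) : Bool :=
  checks2ins1Loop s1.toList s2.toList 0 0

-- ===== PORT B =====
-- Source B's index pass over s1: for k, ch in enumerate(s1): pos.setdefault(ch, []).append(k)
-- (l.zipIdx pairs each character with its index, like enumerate).
def checks2ins1AltIndex (l : List Char) : PySem.Dict Char (List Nat) :=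
  l.zipIdx.foldl (fun d p => d.insert p.1 (d.getD p.1 [] ++ [p.2])) PySem.Dict.empty

-- Source B's token pass over s2: token (s2[j], primed) with primed = "next char is a quote",
-- advancing 2 positions when primed else 1 (here: recursing on the rest resp. its tail).
def checks2ins1Tokenize : List Char → List (Char × Bool)
  | [] => []
  | c :: rest =>
    if (!rest.isEmpty) && (rest.headD ' ' == '\'') then
      (c, true) :: checks2ins1Tokenize (rest.drop 1)
    else
      (c, false) :: checks2ins1Tokenize rest
termination_by l => l.length
decreasing_by all_goals simp

-- Source B's hand-rolled bisect_left(P, x) with boundaries lo, hi.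
def checks2ins1Bisect (P : List Nat) (x lo hi : Nat) : Nat :=
  if _h : lo < hi then
    let mid := (lo + hi) / 2
    if P.getD mid 0 < x then checks2ins1Bisect P x (mid + 1) hi
    else checks2ins1Bisect P x lo mid
  else lo
termination_by hi - lo
decreasing_by all_goals omega

-- Source B's main loop: for each token, bisect the position list of its char for the first
-- occurrence at or after the cursor i, check the prime flag there, and jump the cursor.
def checks2ins1AltMatch (l1 : List Char) (d : PySem.Dict Char (List Nat)) : Nat → List (Char × Bool) → Bool
  | _, [] => true
  | i, (c, p) :: ts =>
    let P := d.getD c []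
    let lo := checks2ins1Bisect P i 0 P.length
    if lo == P.length then false
    else
      let k := P.getD lo 0
      if ((decide (k + 1 < l1.length)) && (l1.getD (k + 1) ' ' == '\'')) != p then false
      else checks2ins1AltMatch l1 d (k + if p then 2 else 1) ts

def checks2ins1_alt (s1 : String) (s2 : String) : Bool :=
  checks2ins1AltMatch s1.toList (checks2ins1AltIndex s1.toList) 0 (checks2ins1Tokenize s2.toList)

-- ===== PRECONDITION & SPEC =====
def Spec_checks2ins1 (s1 : String) (s2 : String) (out : Bool) : Prop := out = checks2ins1_alt s1 s2
instance (s1 : String) (s2 : String) (out : Bool) : Decidable (Spec_checks2ins1 s1 s2 out) := by unfold Spec_checks2ins1; infer_instance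

-- ===== CLAIM (what is proved, stated in full; the proofs are below) =====
def Claim_equal_checks2ins1 : Prop := ∀ (s1 : String) (s2 : String), Dom_checks2ins1 s1 s2 → Spec_checks2ins1 s1 s2 (checks2ins1 s1 s2)

-- ===== LEMMAS AND PROOFS =====

-- proof-side middle layer: the first index k ≥ i with l[k] = c
def pvFindFrom (l : List Char) (c : Char) (i : Nat) : Option Nat :=
  if h : i < l.length then
    (if l[i] = c then some i else pvFindFrom l c (i+1))
  else none
termination_by l.length - i

-- proof-side middle layer: token matching driven by pvFindFrom
def pvMid (l1 : List Char) : Nat → List (Char × Bool) → Bool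
  | _, [] => true
  | i, (c, p) :: ts =>
    match pvFindFrom l1 c i with
    | none => false
    | some k =>
      if ((decide (k + 1 < l1.length)) && (l1.getD (k + 1) ' ' == '\'')) != p then false
      else pvMid l1 (k + if p then 2 else 1) ts

lemma findFrom_of_ge (l : List Char) (c : Char) (i : Nat) (h : l.length ≤ i) :
    pvFindFrom l c i = none := by
  rw [pvFindFrom]; rw [dif_neg (by omega)]

lemma findFrom_of_hit (l : List Char) (c : Char) (i : Nat) (h : i < l.length) (hc : l[i] = c) :
    pvFindFrom l c i = some i := by
  rw [pvFindFrom]; rw [dif_pos h, if_pos hc]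

lemma findFrom_of_miss (l : List Char) (c : Char) (i : Nat) (h : i < l.length) (hc : ¬ l[i] = c) :
    pvFindFrom l c i = pvFindFrom l c (i+1) := by
  rw [pvFindFrom]; rw [dif_pos h, if_neg hc]

lemma findFrom_none (l : List Char) (c : Char) :
    ∀ n i, l.length - i ≤ n → (∀ k, i ≤ k → (hk : k < l.length) → l[k] ≠ c) →
    pvFindFrom l c i = none := by
  intro n
  induction n with
  | zero => intro i hn _; exact findFrom_of_ge l c i (by omega)
  | succ n ih =>
    intro i hn hall
    by_cases h : i < l.length
    · rw [findFrom_of_miss l c i h (hall i le_rfl h)]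
      exact ih (i+1) (by omega) (fun k hk => hall k (by omega))
    · exact findFrom_of_ge l c i (by omega)

lemma findFrom_some (l : List Char) (c : Char) :
    ∀ n i k, k - i ≤ n → i ≤ k → (hk : k < l.length) → l[k] = c →
    (∀ j, i ≤ j → j < k → (hj : j < l.length) → l[j] ≠ c) →
    pvFindFrom l c i = some k := by
  intro n
  induction n with
  | zero =>
    intro i k hn hik hk hc _
    have : i = k := by omega
    subst this
    exact findFrom_of_hit l c i hk hc
  | succ n ih =>
    intro i k hn hik hk hc hmin
    have hi : i < l.length := by omega
    by_cases h : l[i] = c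
    · have : i = k := by
        by_contra hne
        exact hmin i le_rfl (by omega) hi h
      subst this
      exact findFrom_of_hit l c i hi h
    · rw [findFrom_of_miss l c i hi h]
      have hik' : i + 1 ≤ k := by
        rcases Nat.eq_or_lt_of_le hik with h' | h'
        · exact absurd (h' ▸ hc) h
        · omega
      exact ih (i+1) k (by omega) hik' hk hc (fun j hj => hmin j (by omega))

-- ---- A-side: the loop equals pvMid over the tokens of the remaining s2 ----

lemma tokenize_drop_nil (l : List Char) (i : Nat) (h : l.length ≤ i) :
    checks2ins1Tokenize (l.drop i) = [] := by
  rw [List.drop_eq_nil_of_le h, checks2ins1Tokenize]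

lemma drop_cons (l : List Char) (i : Nat) (h : i < l.length) :
    l.drop i = l[i] :: l.drop (i+1) :=
  List.drop_eq_getElem_cons h

-- the "primed" test on the suffix starting at k, as a bounds-checked lookup
lemma primedAt (l : List Char) (k : Nat) :
    ((!(l.drop k).isEmpty) && ((l.drop k).headD ' ' == '\'')) =
      (decide (k < l.length) && (l.getD k ' ' == '\'')) := by
  by_cases h : k < l.length
  · rw [drop_cons l k h]
    simp [h]
  · rw [List.drop_eq_nil_of_le (by omega)]
    simp [h]

lemma tokenize_drop_primed (l : List Char) (i : Nat) (h : i < l.length)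
    (hp : (decide (i+1 < l.length) && (l.getD (i+1) ' ' == '\'')) = true) :
    checks2ins1Tokenize (l.drop i) = (l[i], true) :: checks2ins1Tokenize (l.drop (i+2)) := by
  rw [drop_cons l i h, checks2ins1Tokenize]
  simp only [primedAt l (i+1), hp, if_true, List.drop_drop]

lemma tokenize_drop_unprimed (l : List Char) (i : Nat) (h : i < l.length)
    (hp : (decide (i+1 < l.length) && (l.getD (i+1) ' ' == '\'')) = false) :
    checks2ins1Tokenize (l.drop i) = (l[i], false) :: checks2ins1Tokenize (l.drop (i+1)) := by
  rw [drop_cons l i h, checks2ins1Tokenize]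
  simp only [primedAt l (i+1), hp]
  simp

-- The invariant: A's loop state (i1, i2) corresponds to pvMid's state (cursor i1,
-- tokens of s2 from i2); it holds for every i1 i2 because s2's tokenisation restarts
-- cleanly at any position.
lemma loop_eq_mid (l1 l2 : List Char) :
    ∀ n i1 i2, l1.length - i1 ≤ n →
      checks2ins1Loop l1 l2 i1 i2 = pvMid l1 i1 (checks2ins1Tokenize (l2.drop i2)) := by
  intro n
  induction n with
  | zero =>
    intro i1 i2 hn
    have h1 : l1.length ≤ i1 := by omega
    rw [checks2ins1Loop]
    rw [dif_neg (by omega)]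
    by_cases h2 : i2 < l2.length
    · have hnone := findFrom_of_ge l1 (l2[i2]) i1 h1
      by_cases hp : (decide (i2+1 < l2.length) && (l2.getD (i2+1) ' ' == '\'')) = true
      · rw [tokenize_drop_primed l2 i2 h2 hp, pvMid, hnone]
        simp [h1, h2]
      · rw [tokenize_drop_unprimed l2 i2 h2 (by simpa using hp), pvMid, hnone]
        simp [h1, h2]
    · rw [tokenize_drop_nil l2 i2 (by omega), pvMid]
      simp [h1, h2]
  | succ n ih =>
    intro i1 i2 hn
    rw [checks2ins1Loop]
    by_cases h1 : i1 < l1.length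
    · by_cases h2 : i2 < l2.length
      · rw [dif_pos ⟨h1, h2⟩]
        have e1 : l1.getD i1 ' ' = l1[i1] := List.getD_eq_getElem l1 ' ' h1
        have e2 : l2.getD i2 ' ' = l2[i2] := List.getD_eq_getElem l2 ' ' h2
        by_cases hc : l1[i1] = l2[i2]
        · -- matching head characters: pvFindFrom finds i1 itself
          have hfind := findFrom_of_hit l1 (l2[i2]) i1 h1 hc
          by_cases hp2 : (decide (i2+1 < l2.length) && (l2.getD (i2+1) ' ' == '\'')) = true
          · -- s2 token is primed
            rw [tokenize_drop_primed l2 i2 h2 hp2, pvMid, hfind]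
            have hA : (decide (i2 < l2.length - 1) && (l2.getD (i2+1) ' ' == '\'')) = true := by
              simp only [Bool.and_eq_true, decide_eq_true_eq] at hp2 ⊢
              exact ⟨by omega, hp2.2⟩
            simp only [e1, e2, hc, beq_self_eq_true, if_true, hA]
            by_cases hp1 : (decide (i1+1 < l1.length) && (l1.getD (i1+1) ' ' == '\'')) = true
            · -- s1 also primed: both advance by two
              have hp1' := hp1
              simp only [Bool.and_eq_true, decide_eq_true_eq] at hp1'
              have hA1 : (decide (i1 < l1.length - 1) && !(l1.getD (i1+1) ' ' == '\'')) = false := by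
                rw [hp1'.2]; simp
              have hA2 : (i1 == l1.length - 1) = false := by
                simp only [beq_eq_false_iff_ne, ne_eq]; omega
              rw [hA1, hp1]
              simp only [Bool.false_eq_true, if_false, hA2, bne_self_eq_false]
              rw [ih (i1+2) (i2+2) (by omega)]
            · -- s1 not primed, s2 primed: A breaks False; pvMid sees flag mismatch
              have hs1p : (decide (i1+1 < l1.length) && (l1.getD (i1+1) ' ' == '\'')) = false := by
                simpa using hp1
              rw [hs1p]
              have hp1' := hp1
              simp only [Bool.and_eq_true, not_and, decide_eq_true_eq] at hp1'
              by_cases hb : i1 + 1 < l1.length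
              · have hA1 : (decide (i1 < l1.length - 1) && !(l1.getD (i1+1) ' ' == '\'')) = true := by
                  have hq : (l1.getD (i1+1) ' ' == '\'') = false := by
                    simpa using hp1' hb
                  rw [hq]
                  simp
                  omega
                rw [hA1]
                simp
              · have hA2 : (i1 == l1.length - 1) = true := by simp; omega
                have hA1 : (decide (i1 < l1.length - 1) && !(l1.getD (i1+1) ' ' == '\'')) = false := by
                  simp; omega
                rw [hA1, hA2]
                simp
          · -- s2 token is unprimed
            have hp2' : (decide (i2+1 < l2.length) && (l2.getD (i2+1) ' ' == '\'')) = false := by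
              simpa using hp2
            rw [tokenize_drop_unprimed l2 i2 h2 hp2', pvMid, hfind]
            have hA : (decide (i2 < l2.length - 1) && (l2.getD (i2+1) ' ' == '\'')) = false := by
              simp only [Bool.and_eq_false_iff] at hp2' ⊢
              rcases hp2' with h | h
              · left; simp at h ⊢; omega
              · right; exact h
            simp only [e1, e2, hc, beq_self_eq_true, if_true, hA, Bool.false_eq_true, if_false]
            by_cases hp1 : (decide (i1+1 < l1.length) && (l1.getD (i1+1) ' ' == '\'')) = true
            · -- s1 primed, s2 not: A breaks False; pvMid sees flag mismatch
              have hA1 : (decide (i1 < l1.length - 1) && (l1.getD (i1+1) ' ' == '\'')) = true := by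
                simp only [Bool.and_eq_true, decide_eq_true_eq] at hp1 ⊢
                exact ⟨by omega, hp1.2⟩
              rw [hA1, hp1]
              simp
            · -- both unprimed: advance by one
              have hp1' : (decide (i1+1 < l1.length) && (l1.getD (i1+1) ' ' == '\'')) = false := by
                simpa using hp1
              have hA1 : (decide (i1 < l1.length - 1) && (l1.getD (i1+1) ' ' == '\'')) = false := by
                simp only [Bool.and_eq_false_iff] at hp1' ⊢
                rcases hp1' with h | h
                · left; simp at h ⊢; omega
                · right; exact h
              rw [hA1, hp1']
              simp only [Bool.false_eq_true, if_false, bne_self_eq_false]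
              rw [ih (i1+1) (i2+1) (by omega)]
        · -- heads differ: A advances i1 only; pvFindFrom steps over i1
          have hcc : (l1.getD i1 ' ' == l2.getD i2 ' ') = false := by
            rw [e1, e2]; simp [hc]
          rw [hcc]
          simp only [Bool.false_eq_true, if_false]
          rw [ih (i1+1) i2 (by omega)]
          -- pvMid at i1 equals pvMid at i1+1: the head token's findFrom steps over the miss
          by_cases hp2 : (decide (i2+1 < l2.length) && (l2.getD (i2+1) ' ' == '\'')) = true
          · rw [tokenize_drop_primed l2 i2 h2 hp2, pvMid, pvMid,
              findFrom_of_miss l1 (l2[i2]) i1 h1 hc]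
          · rw [tokenize_drop_unprimed l2 i2 h2 (by simpa using hp2), pvMid, pvMid,
              findFrom_of_miss l1 (l2[i2]) i1 h1 hc]
      · -- i2 exhausted: loop answer is true; token list is empty, pvMid returns true
        rw [dif_neg (by omega), tokenize_drop_nil l2 i2 (by omega), pvMid]
        simp [h2]
    · -- i1 exhausted
      have h1' : l1.length ≤ i1 := by omega
      rw [dif_neg (by omega)]
      by_cases h2 : i2 < l2.length
      · have hnone := findFrom_of_ge l1 (l2[i2]) i1 h1'
        by_cases hp : (decide (i2+1 < l2.length) && (l2.getD (i2+1) ' ' == '\'')) = true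
        · rw [tokenize_drop_primed l2 i2 h2 hp, pvMid, hnone]
          simp [h1', h2]
        · rw [tokenize_drop_unprimed l2 i2 h2 (by simpa using hp), pvMid, hnone]
          simp [h1', h2]
      · rw [tokenize_drop_nil l2 i2 (by omega), pvMid]
        simp [h2]

-- ---- B-side: the index + bisect loop equals pvMid ----

-- the ascending list of positions of c in l (what the index stores under key c)
def pvPos (l : List Char) (c : Char) : List Nat :=
  (l.zipIdx.filter (fun p => p.1 == c)).map (·.2)

lemma foldl_insert_getD (ps : List (Char × Nat)) (d : PySem.Dict Char (List Nat)) (c : Char) :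
    (ps.foldl (fun d p => d.insert p.1 (d.getD p.1 [] ++ [p.2])) d).getD c []
      = d.getD c [] ++ ((ps.filter (fun p => p.1 == c)).map (·.2)) := by
  induction ps generalizing d with
  | nil => simp
  | cons p ps ih =>
    rw [List.foldl_cons, List.filter_cons, ih]
    by_cases h : p.1 = c
    · simp [pysem, h]
    · have h' : ¬ c = p.1 := fun hh => h hh.symm
      simp [pysem, h', h]

lemma altIndex_getD (l : List Char) (c : Char) :
    (checks2ins1AltIndex l).getD c [] = pvPos l c := by
  rw [checks2ins1AltIndex, foldl_insert_getD, pvPos]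
  simp [pysem]

lemma pvPos_pairwise (l : List Char) (c : Char) : (pvPos l c).Pairwise (· < ·) := by
  have hz : (l.zipIdx).Pairwise (fun p q => p.2 < q.2) := by
    rw [List.pairwise_iff_getElem]
    intro a b ha hb hab
    simp only [List.getElem_zipIdx]
    omega
  exact List.pairwise_map.mpr (hz.filter _)

lemma mem_pvPos (l : List Char) (c : Char) (k : Nat) :
    k ∈ pvPos l c ↔ l[k]? = some c := by
  constructor
  · intro hk
    rcases List.mem_map.mp hk with ⟨p, hp, hpk⟩
    rcases List.mem_filter.mp hp with ⟨hpz, hpc⟩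
    have : p = (c, k) := by
      rcases p with ⟨a, b⟩
      simp only [beq_iff_eq] at hpc
      simp_all
    rw [this] at hpz
    exact List.mk_mem_zipIdx_iff_getElem?.mp hpz
  · intro hk
    apply List.mem_map.mpr
    refine ⟨(c, k), List.mem_filter.mpr ⟨List.mk_mem_zipIdx_iff_getElem?.mpr hk, by simp⟩, rfl⟩

lemma bisect_spec (P : List Nat) (x : Nat) (hP : P.Pairwise (· < ·)) :
    ∀ fuel lo hi, hi - lo ≤ fuel → lo ≤ hi → hi ≤ P.length →
    (∀ j, (hj : j < P.length) → j < lo → P[j] < x) →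
    (∀ j, (hj : j < P.length) → hi ≤ j → x ≤ P[j]) →
    lo ≤ checks2ins1Bisect P x lo hi ∧ checks2ins1Bisect P x lo hi ≤ hi ∧
    (∀ j, (hj : j < P.length) → j < checks2ins1Bisect P x lo hi → P[j] < x) ∧
    (∀ j, (hj : j < P.length) → checks2ins1Bisect P x lo hi ≤ j → x ≤ P[j]) := by
  have hmono : ∀ a b, (ha : a < P.length) → (hb : b < P.length) → a ≤ b → P[a] ≤ P[b] := by
    intro a b ha hb hab
    rcases Nat.eq_or_lt_of_le hab with h | h
    · subst h; exact le_rfl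
    · exact le_of_lt (List.pairwise_iff_getElem.mp hP a b ha hb h)
  intro fuel
  induction fuel with
  | zero =>
    intro lo hi hf hlh hhl hlow hhigh
    have : lo = hi := by omega
    subst this
    rw [checks2ins1Bisect, dif_neg (by omega)]
    exact ⟨le_rfl, le_rfl, hlow, hhigh⟩
  | succ n ih =>
    intro lo hi hf hlh hhl hlow hhigh
    by_cases h : lo < hi
    · rw [checks2ins1Bisect, dif_pos h]
      have hmid1 : lo ≤ (lo + hi) / 2 := by omega
      have hmid2 : (lo + hi) / 2 < hi := by omega
      have hmidP : (lo + hi) / 2 < P.length := by omega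
      have hgd : P.getD ((lo + hi) / 2) 0 = P[(lo + hi) / 2] :=
        List.getD_eq_getElem P 0 hmidP
      by_cases hcmp : P.getD ((lo + hi) / 2) 0 < x
      · rw [if_pos hcmp]
        have hlow' : ∀ j, (hj : j < P.length) → j < (lo + hi) / 2 + 1 → P[j] < x := by
          intro j hj hjm
          have : P[j] ≤ P[(lo + hi) / 2] := hmono j _ hj hmidP (by omega)
          rw [hgd] at hcmp
          omega
        have := ih ((lo + hi) / 2 + 1) hi (by omega) (by omega) hhl hlow' hhigh
        exact ⟨by omega, this.2.1, this.2.2.1, this.2.2.2⟩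
      · rw [if_neg hcmp]
        have hhigh' : ∀ j, (hj : j < P.length) → (lo + hi) / 2 ≤ j → x ≤ P[j] := by
          intro j hj hjm
          have : P[(lo + hi) / 2] ≤ P[j] := hmono _ j hmidP hj hjm
          rw [hgd] at hcmp
          omega
        have := ih lo ((lo + hi) / 2) (by omega) (by omega) (by omega) hlow hhigh'
        exact ⟨this.1, by omega, this.2.2.1, this.2.2.2⟩
    · rw [checks2ins1Bisect, dif_neg h]
      have : lo = hi := by omega
      subst this
      exact ⟨le_rfl, le_rfl, hlow, hhigh⟩

-- the bisect of the position list computes pvFindFrom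
lemma bisect_eq_findFrom (l : List Char) (c : Char) (i : Nat) :
    (checks2ins1Bisect (pvPos l c) i 0 (pvPos l c).length = (pvPos l c).length →
      pvFindFrom l c i = none) ∧
    (∀ hr : checks2ins1Bisect (pvPos l c) i 0 (pvPos l c).length < (pvPos l c).length,
      pvFindFrom l c i = some ((pvPos l c)[checks2ins1Bisect (pvPos l c) i 0 (pvPos l c).length])) := by
  set P := pvPos l c with hPdef
  have hP := pvPos_pairwise l c
  obtain ⟨-, -, hlow, hhigh⟩ :=
    bisect_spec P i hP P.length 0 P.length (by omega) (by omega) le_rfl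
      (by intro j hj hj0; omega) (by intro j hj hjl; omega)
  set r := checks2ins1Bisect P i 0 P.length with hrdef
  constructor
  · intro hr
    apply findFrom_none l c (l.length - i) i le_rfl
    intro k hik hk hc
    have hkP : k ∈ P := (mem_pvPos l c k).mpr (by simp [hk, hc])
    rcases List.mem_iff_getElem.mp hkP with ⟨j, hj, hjk⟩
    have := hlow j hj (by omega)
    omega
  · intro hr
    have hk0P : P[r] ∈ P := List.getElem_mem hr
    have hk0 := (mem_pvPos l c P[r]).mp hk0P
    obtain ⟨hk0len, hk0c⟩ := List.getElem?_eq_some_iff.mp hk0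
    have hik0 : i ≤ P[r] := hhigh r hr le_rfl
    apply findFrom_some l c (P[r] - i) i P[r] le_rfl hik0 hk0len hk0c
    intro j hij hjk hjl hjc
    have hjP : j ∈ P := (mem_pvPos l c j).mpr (by simp [hjl, hjc])
    rcases List.mem_iff_getElem.mp hjP with ⟨m, hm, hmj⟩
    by_cases hmr : m < r
    · have := hlow m hm hmr
      omega
    · have : P[r] ≤ P[m] := by
        rcases Nat.eq_or_lt_of_le (Nat.le_of_not_lt hmr) with h | h
        · subst h; exact le_rfl
        · exact le_of_lt (List.pairwise_iff_getElem.mp hP r m hr hm h)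
      omega

lemma altMatch_eq_mid (l1 : List Char) :
    ∀ toks i, checks2ins1AltMatch l1 (checks2ins1AltIndex l1) i toks = pvMid l1 i toks := by
  intro toks
  induction toks with
  | nil => intro i; rw [checks2ins1AltMatch, pvMid]
  | cons t ts ih =>
    intro i
    rcases t with ⟨c, p⟩
    rw [checks2ins1AltMatch, pvMid]
    simp only [altIndex_getD l1 c]
    obtain ⟨hnone, hsome⟩ := bisect_eq_findFrom l1 c i
    set P := pvPos l1 c
    set r := checks2ins1Bisect P i 0 P.length with hrdef
    by_cases hr : r = P.length
    · rw [hnone hr]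
      simp [hr]
    · have hrlt : r < P.length := by
        obtain ⟨-, h2, -, -⟩ :=
          bisect_spec P i (pvPos_pairwise l1 c) P.length 0 P.length (by omega) (by omega) le_rfl
            (by intro j hj hj0; omega) (by intro j hj hjl; omega)
        omega
      rw [hsome hrlt]
      have hgd : P.getD r 0 = P[r] := List.getD_eq_getElem P 0 hrlt
      simp only [hgd, beq_iff_eq, hr, if_false]
      by_cases hflag : ((decide (P[r] + 1 < l1.length)) && (l1.getD (P[r] + 1) ' ' == '\'')) != p
      · rw [if_pos hflag, if_pos hflag]
      · rw [if_neg hflag, if_neg hflag, ih]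

-- ===== VERDICT (by name: the statement is the Claim_ definition above) =====
theorem checks2ins1_spec : Claim_equal_checks2ins1 := by
  intro s1 s2 _
  unfold Spec_checks2ins1 checks2ins1 checks2ins1_alt
  rw [altMatch_eq_mid]
  simpa using loop_eq_mid s1.toList s2.toList (s1.toList.length) 0 0 (by omega)
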